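-- pv_equiv track=rewrite | github.com/galchenm/recalculation_overall_statistics_with_high_res_from_refinement | project/full_automation/visualization_utils/window_plot_volume_res.py | calculate_indices_left_to_right_bottom_up
-- ===== SOURCE A (Python) =====
-- def calculate_indices_left_to_right_bottom_up(number_of_pattern, NUM_PORES_PER_LINE, NUM_LINES_PER_WINDOW):
--     TOTAL_NUMBER = NUM_LINES_PER_WINDOW * NUM_PORES_PER_LINE - 1
--     for index_line in range(NUM_LINES_PER_WINDOW):
--         for index_pore in range(NUM_PORES_PER_LINE):
--             calculated_number_of_pattern = TOTAL_NUMBER - ((index_line + 1) * NUM_PORES_PER_LINE - index_pore - 1)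
--             if calculated_number_of_pattern == number_of_pattern:
--                 return index_line, index_pore
--     return None, None
-- ===== SOURCE B (Python) =====
-- def calculate_indices_left_to_right_bottom_up(number_of_pattern, NUM_PORES_PER_LINE, NUM_LINES_PER_WINDOW):
--     # O(1): invert the linear index formula number = (L-1-line)*N + pore
--     N, L, m = NUM_PORES_PER_LINE, NUM_LINES_PER_WINDOW, number_of_pattern
--     if N <= 0 or L <= 0:
--         return None, None
--     q, r = divmod(m, N)
--     index_line = L - 1 - q
--     if 0 <= index_line < L:
--         return index_line, r
--     return None, None
-- ===== Notes on version B (the rewrite author's own statement) =====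
-- stated objective: faster
-- what changed: B inverts the linear index formula (pore = m % N, line = L-1 - m//N with a bounds check) instead of A's nested scan over all L*N grid cells.
import Mathlib
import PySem

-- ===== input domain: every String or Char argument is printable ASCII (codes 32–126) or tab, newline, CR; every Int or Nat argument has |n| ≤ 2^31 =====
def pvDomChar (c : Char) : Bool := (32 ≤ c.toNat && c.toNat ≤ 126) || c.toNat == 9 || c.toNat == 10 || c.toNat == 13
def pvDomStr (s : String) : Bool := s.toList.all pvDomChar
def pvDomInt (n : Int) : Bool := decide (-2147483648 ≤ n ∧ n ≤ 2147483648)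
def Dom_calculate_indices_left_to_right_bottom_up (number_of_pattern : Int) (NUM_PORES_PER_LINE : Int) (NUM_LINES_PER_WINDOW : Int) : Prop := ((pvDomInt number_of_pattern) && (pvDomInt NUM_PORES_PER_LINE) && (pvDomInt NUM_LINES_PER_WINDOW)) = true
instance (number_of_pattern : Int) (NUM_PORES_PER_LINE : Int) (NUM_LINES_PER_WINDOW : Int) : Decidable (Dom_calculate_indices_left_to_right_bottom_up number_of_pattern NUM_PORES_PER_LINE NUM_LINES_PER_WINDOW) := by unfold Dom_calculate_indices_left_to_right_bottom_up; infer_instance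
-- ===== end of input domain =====

-- B replaces A's nested scan over the whole grid by the O(1) inversion of the
-- linear index formula (line = L-1-m//N, pore = m%N, with a bounds check).

-- ===== PORT A =====
-- inner 'for index_pore in range(NUM_PORES_PER_LINE)' loop with early return
def pvInnerA (number_of_pattern TOTAL_NUMBER N index_line : Int) : List Int → Option (Int × Int)
  | [] => none
  | p :: ps =>
    if TOTAL_NUMBER - ((index_line + 1) * N - p - 1) = number_of_pattern then some (index_line, p)
    else pvInnerA number_of_pattern TOTAL_NUMBER N index_line ps

-- outer 'for index_line in range(NUM_LINES_PER_WINDOW)' loop with early return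
def pvOuterA (number_of_pattern TOTAL_NUMBER N : Int) : List Int → Option (Int × Int)
  | [] => none
  | l :: ls =>
    match pvInnerA number_of_pattern TOTAL_NUMBER N l (PySem.List.pyRange 0 N 1) with
    | some r => some r
    | none => pvOuterA number_of_pattern TOTAL_NUMBER N ls

def calculate_indices_left_to_right_bottom_up (number_of_pattern : Int) (NUM_PORES_PER_LINE : Int) (NUM_LINES_PER_WINDOW : Int) : Option Int × Option Int :=
  let TOTAL_NUMBER := NUM_LINES_PER_WINDOW * NUM_PORES_PER_LINE - 1
  match pvOuterA number_of_pattern TOTAL_NUMBER NUM_PORES_PER_LINE (PySem.List.pyRange 0 NUM_LINES_PER_WINDOW 1) with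
  | some (l, p) => (some l, some p)
  | none => (none, none)

-- ===== PORT B =====
def calculate_indices_left_to_right_bottom_up_alt (number_of_pattern : Int) (NUM_PORES_PER_LINE : Int) (NUM_LINES_PER_WINDOW : Int) : Option Int × Option Int :=
  if NUM_PORES_PER_LINE ≤ 0 ∨ NUM_LINES_PER_WINDOW ≤ 0 then (none, none)
  else
    let q := PySem.Int.floordiv number_of_pattern NUM_PORES_PER_LINE
    let r := PySem.Int.mod number_of_pattern NUM_PORES_PER_LINE
    let index_line := NUM_LINES_PER_WINDOW - 1 - q
    if 0 ≤ index_line ∧ index_line < NUM_LINES_PER_WINDOW then (some index_line, some r)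
    else (none, none)

-- ===== PRECONDITION & SPEC =====
def Spec_calculate_indices_left_to_right_bottom_up (number_of_pattern : Int) (NUM_PORES_PER_LINE : Int) (NUM_LINES_PER_WINDOW : Int) (out : Option Int × Option Int) : Prop := out = calculate_indices_left_to_right_bottom_up_alt number_of_pattern NUM_PORES_PER_LINE NUM_LINES_PER_WINDOW
instance (number_of_pattern : Int) (NUM_PORES_PER_LINE : Int) (NUM_LINES_PER_WINDOW : Int) (out : Option Int × Option Int) : Decidable (Spec_calculate_indices_left_to_right_bottom_up number_of_pattern NUM_PORES_PER_LINE NUM_LINES_PER_WINDOW out) := by unfold Spec_calculate_indices_left_to_right_bottom_up; infer_instance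

-- ===== CLAIM (what is proved, stated in full; the proofs are below) =====
def Claim_equal_calculate_indices_left_to_right_bottom_up : Prop := ∀ (number_of_pattern : Int) (NUM_PORES_PER_LINE : Int) (NUM_LINES_PER_WINDOW : Int), Dom_calculate_indices_left_to_right_bottom_up number_of_pattern NUM_PORES_PER_LINE NUM_LINES_PER_WINDOW → Spec_calculate_indices_left_to_right_bottom_up number_of_pattern NUM_PORES_PER_LINE NUM_LINES_PER_WINDOW (calculate_indices_left_to_right_bottom_up number_of_pattern NUM_PORES_PER_LINE NUM_LINES_PER_WINDOW)

-- ===== LEMMAS AND PROOFS =====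

-- the inner loop is a first-match search for the unique pore value p = m - total + (l+1)*N - 1
theorem pvInnerA_eq (m total N l : Int) (xs : List Int) :
    pvInnerA m total N l xs =
      if (m - total + (l + 1) * N - 1) ∈ xs then some (l, m - total + (l + 1) * N - 1) else none := by
  induction xs with
  | nil => simp [pvInnerA]
  | cons p ps ih =>
    by_cases h : p = m - total + (l + 1) * N - 1
    · subst h; simp [pvInnerA]; omega
    · have hc : ¬ (total - ((l + 1) * N - p - 1) = m) := by omega
      have h' : ¬ (m - total + (l + 1) * N - 1 = p) := fun e => h e.symm
      simp [pvInnerA, hc, ih, h']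

-- with 0 < N, floordiv m N = k exactly when 0 ≤ m - k*N < N
theorem pv_fdiv_char (m N k : Int) (hN : 0 < N) :
    PySem.Int.floordiv m N = k ↔ (0 ≤ m - k * N ∧ m - k * N < N) := by
  rw [PySem.Int.floordiv_eq_iff_of_pos hN]
  have h : (k + 1) * N = k * N + N := by ring
  constructor <;> rintro ⟨h1, h2⟩ <;> constructor <;> linarith

theorem pv_mod_val (m N : Int) :
    PySem.Int.mod m N = m - PySem.Int.floordiv m N * N := by
  have := PySem.Int.floordiv_mul_add_mod m N
  omega

-- the outer loop finds the unique matching line L-1-(m//N), if present in the list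
theorem pvOuterA_eq (m N L : Int) (hN : 0 < N) (ls : List Int) :
    pvOuterA m (L * N - 1) N ls =
      if (L - 1 - PySem.Int.floordiv m N) ∈ ls
      then some (L - 1 - PySem.Int.floordiv m N, PySem.Int.mod m N) else none := by
  induction ls with
  | nil => simp [pvOuterA]
  | cons l ls ih =>
    have hmem : (m - (L * N - 1) + (l + 1) * N - 1) ∈ PySem.List.pyRange 0 N 1 ↔
        (0 ≤ m - (L * N - 1) + (l + 1) * N - 1 ∧ m - (L * N - 1) + (l + 1) * N - 1 < N) := by
      rw [PySem.List.mem_pyRange_one]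
    by_cases h : PySem.Int.floordiv m N = L - 1 - l
    · -- this line is the unique match: the inner search succeeds
      have hb := (pv_fdiv_char m N (L - 1 - l) hN).mp h
      have hlift : m - (L * N - 1) + (l + 1) * N - 1 = m - (L - 1 - l) * N := by ring
      have hb' : 0 ≤ m - (L * N - 1) + (l + 1) * N - 1 ∧ m - (L * N - 1) + (l + 1) * N - 1 < N :=
        ⟨by linarith [hb.1], by linarith [hb.2]⟩
      rw [pvOuterA, pvInnerA_eq, if_pos (hmem.mpr hb')]
      have hl0 : L - 1 - PySem.Int.floordiv m N = l := by omega
      rw [hl0, if_pos (List.mem_cons_self)]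
      have hmv : m - (L * N - 1) + (l + 1) * N - 1 = PySem.Int.mod m N := by
        rw [pv_mod_val m N, h]; ring
      rw [hmv]
    · -- no pore on this line matches; recurse
      have hnb : ¬ (0 ≤ m - (L - 1 - l) * N ∧ m - (L - 1 - l) * N < N) := by
        intro hb; exact h ((pv_fdiv_char m N (L - 1 - l) hN).mpr hb)
      have hlift : m - (L * N - 1) + (l + 1) * N - 1 = m - (L - 1 - l) * N := by ring
      rw [pvOuterA, pvInnerA_eq, if_neg (by rw [hmem, hlift]; exact hnb), ih]
      have hne : L - 1 - PySem.Int.floordiv m N ≠ l := by omega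
      by_cases hm : (L - 1 - PySem.Int.floordiv m N) ∈ ls
      · rw [if_pos hm, if_pos (List.mem_cons_of_mem _ hm)]
      · rw [if_neg hm, if_neg (by simp [hne, hm])]

-- if N ≤ 0 every inner range is empty, so the whole scan returns none
theorem pvOuterA_of_nonpos (m total N : Int) (hN : N ≤ 0) (ls : List Int) :
    pvOuterA m total N ls = none := by
  induction ls with
  | nil => rfl
  | cons l ls ih =>
    rw [pvOuterA, PySem.List.pyRange_one_eq_nil (by omega)]
    simpa [pvInnerA] using ih

-- ===== VERDICT (by name: the statement is the Claim_ definition above) =====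
theorem calculate_indices_left_to_right_bottom_up_spec : Claim_equal_calculate_indices_left_to_right_bottom_up := by
  intro m N L _
  unfold Spec_calculate_indices_left_to_right_bottom_up
  unfold calculate_indices_left_to_right_bottom_up calculate_indices_left_to_right_bottom_up_alt
  dsimp only
  by_cases hN : N ≤ 0
  · rw [pvOuterA_of_nonpos m _ N hN]
    simp [hN]
  · rw [not_le] at hN
    by_cases hL : L ≤ 0
    · rw [PySem.List.pyRange_one_eq_nil (by omega)]
      simp [pvOuterA, hL]
    · rw [not_le] at hL
      rw [pvOuterA_eq m N L hN]
      simp only [PySem.List.mem_pyRange_one]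
      by_cases hin : 0 ≤ L - 1 - PySem.Int.floordiv m N ∧ L - 1 - PySem.Int.floordiv m N < L
      · rw [if_pos hin, if_neg (show ¬(N ≤ 0 ∨ L ≤ 0) by omega), if_pos hin]
      · rw [if_neg hin, if_neg (show ¬(N ≤ 0 ∨ L ≤ 0) by omega), if_neg hin]
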